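-- pv_equiv track=rewrite | github.com/pypi-data/pypi-mirror-360 | packages/alexscan/alexscan-0.1.0.tar.gz/alexscan-0.1.0/alexscan/analyzers/dga.py | _max_consecutive_digits
-- ===== SOURCE A (Python) =====
-- def _max_consecutive_digits(text: str) -> int:
--     """Find maximum consecutive digits."""
--     max_consecutive = 0
--     current_consecutive = 0
--
--     for char in text:
--         if char.isdigit():
--             current_consecutive += 1
--             max_consecutive = max(max_consecutive, current_consecutive)
--         else:
--             current_consecutive = 0
--
--     return max_consecutive
-- ===== SOURCE B (Python) =====
-- def _digit_prefix_len(s):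
--     n = 0
--     for ch in s:
--         if not ch.isdigit():
--             break
--         n += 1
--     return n
--
--
-- def _max_consecutive_digits(text: str) -> int:
--     """Find maximum consecutive digits."""
--     best = 0
--     rest = text
--     while rest:
--         if rest[0].isdigit():
--             run = _digit_prefix_len(rest[1:])
--             best = max(best, 1 + run)
--             rest = rest[1 + run:]
--         else:
--             rest = rest[1:]
--     return best
-- ===== Notes on version B (the rewrite author's own statement) =====
-- stated objective: alternative
-- what changed: Instead of one pass maintaining current/max counters per character, B scans the string run by run: at each digit it measures the whole digit run with a prefix-length helper, folds max over run lengths, and jumps past the run.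
import Mathlib
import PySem

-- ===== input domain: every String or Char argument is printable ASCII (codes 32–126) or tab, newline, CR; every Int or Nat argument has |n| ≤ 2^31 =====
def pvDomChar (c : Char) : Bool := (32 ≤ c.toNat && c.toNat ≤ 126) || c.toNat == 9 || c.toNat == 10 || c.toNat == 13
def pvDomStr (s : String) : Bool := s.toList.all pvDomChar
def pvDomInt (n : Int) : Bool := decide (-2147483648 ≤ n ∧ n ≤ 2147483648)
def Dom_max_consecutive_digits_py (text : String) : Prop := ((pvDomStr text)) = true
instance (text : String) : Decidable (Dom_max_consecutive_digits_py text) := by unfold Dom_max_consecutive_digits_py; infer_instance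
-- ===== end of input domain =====

-- B re-implements the counter loop as a run-by-run scan (measure each digit run, fold max, jump past it); same O(n) cost, return values proved equal.

-- ===== PORT A =====
-- the single pass with max_consecutive / current_consecutive counters
def pvAGo : List Char → Int → Int → Int
  | [], maxC, _ => maxC
  | c :: cs, maxC, curC =>
    if PySem.Chars.isdigit c then pvAGo cs (max maxC (curC + 1)) (curC + 1)
    else pvAGo cs maxC 0

def max_consecutive_digits_py (text : String) : Int :=
  pvAGo text.toList 0 0

-- ===== PORT B =====
-- helper _digit_prefix_len: length of the leading digit run
def pvDigitPrefixLen : List Char → Nat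
  | [] => 0
  | c :: cs => if PySem.Chars.isdigit c then 1 + pvDigitPrefixLen cs else 0

-- the while loop over `rest`, jumping past each measured run
def pvBGo : List Char → Int → Int
  | [], best => best
  | c :: cs, best =>
    if PySem.Chars.isdigit c then
      let run := pvDigitPrefixLen cs
      pvBGo (cs.drop run) (max best (1 + (run : Int)))
    else pvBGo cs best
termination_by cs _ => cs.length
decreasing_by
  · simp only [List.length_drop, List.length_cons]; omega
  · exact Nat.lt_succ_self _

def max_consecutive_digits_py_alt (text : String) : Int :=
  pvBGo text.toList 0

-- ===== PRECONDITION & SPEC =====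
def Spec_max_consecutive_digits_py (text : String) (out : Int) : Prop := out = max_consecutive_digits_py_alt text
instance (text : String) (out : Int) : Decidable (Spec_max_consecutive_digits_py text out) := by unfold Spec_max_consecutive_digits_py; infer_instance

-- ===== CLAIM (what is proved, stated in full; the proofs are below) =====
def Claim_equal_max_consecutive_digits_py : Prop := ∀ (text : String), Dom_max_consecutive_digits_py text → Spec_max_consecutive_digits_py text (max_consecutive_digits_py text)

-- ===== LEMMAS AND PROOFS =====

-- reference "best run so far, given a current run of length cur" function both ports reduce to
def pvK : List Char → Int → Int
  | [], _ => 0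
  | c :: cs, cur =>
    if PySem.Chars.isdigit c then max (cur + 1) (pvK cs (cur + 1)) else pvK cs 0

lemma pvAGo_eq (cs : List Char) : ∀ maxC curC : Int, 0 ≤ maxC →
    pvAGo cs maxC curC = max maxC (pvK cs curC) := by
  induction cs with
  | nil => intro maxC curC hm; simp [pvAGo, pvK]; omega
  | cons c cs ih =>
    intro maxC curC hm
    by_cases h : PySem.Chars.isdigit c
    · rw [pvAGo]; simp only [h, if_pos]
      rw [ih _ _ (by omega)]
      simp only [pvK, h, if_pos]
      omega
    · rw [pvAGo]; simp only [h]
      rw [ih _ _ hm]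
      simp [pvK, h]

lemma pvK_run (cs : List Char) : ∀ cur : Int,
    max (cur + pvDigitPrefixLen cs) (pvK (cs.drop (pvDigitPrefixLen cs)) 0) = max cur (pvK cs cur) := by
  induction cs with
  | nil => intro cur; simp [pvDigitPrefixLen, pvK]
  | cons c cs ih =>
    intro cur
    by_cases h : PySem.Chars.isdigit c
    · have := ih (cur + 1)
      simp only [pvDigitPrefixLen, pvK, h, if_pos] at *
      have hd : (c :: cs).drop (1 + pvDigitPrefixLen cs) = cs.drop (pvDigitPrefixLen cs) := by
        rw [Nat.add_comm]; simp [List.drop_succ_cons]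
      rw [hd]
      push_cast at *
      omega
    · simp only [pvDigitPrefixLen, pvK, h]
      simp [pvK, h]

lemma pvBGo_eq : ∀ (n : ℕ) (cs : List Char), cs.length ≤ n → ∀ best : Int, 0 ≤ best →
    pvBGo cs best = max best (pvK cs 0) := by
  intro n
  induction n with
  | zero =>
    intro cs hcs best hb
    have : cs = [] := List.eq_nil_of_length_eq_zero (Nat.le_zero.mp hcs)
    subst this; simp [pvBGo, pvK]; omega
  | succ n ih =>
    intro cs hcs best hb
    match cs with
    | [] => simp [pvBGo, pvK]; omega
    | c :: cs =>
      by_cases h : PySem.Chars.isdigit c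
      · rw [pvBGo]
        simp only [h, if_pos]
        rw [ih (cs.drop (pvDigitPrefixLen cs))
              (by simp only [List.length_drop, List.length_cons] at hcs ⊢; omega)
              _ (by positivity)]
        have := pvK_run cs (1 : Int)
        simp only [pvK, h, if_pos, zero_add]
        omega
      · rw [pvBGo]
        simp only [h]
        rw [ih cs (Nat.le_of_succ_le_succ hcs) best hb]
        simp [pvK, h]

-- ===== VERDICT (by name: the statement is the Claim_ definition above) =====
theorem max_consecutive_digits_py_spec : Claim_equal_max_consecutive_digits_py := by
  intro text _
  unfold Spec_max_consecutive_digits_py max_consecutive_digits_py max_consecutive_digits_py_alt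
  rw [pvAGo_eq _ _ _ (le_refl 0), pvBGo_eq text.toList.length text.toList (Nat.le_refl _) 0 (le_refl _)]
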